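-- pv_equiv track=rewrite | github.com/mastersubhajit/Multimodal-Traceability-Mesh | scripts/eval_generation.py | _option_rank
-- ===== SOURCE A (Python) =====
-- def _option_rank(generated: str, correct_label: str) -> int:
--     """Return 1-based rank of correct_label among A/B/C/D found in generated text."""
--     text = generated.upper()
--     seen = []
--     for ch in ["A", "B", "C", "D"]:
--         idx = text.find(ch)
--         if idx != -1:
--             seen.append((idx, ch))
--     seen.sort()
--     labels = [ch for _, ch in seen]
--     try:
--         return labels.index(correct_label.upper()) + 1
--     except ValueError:
--         return len(labels) + 1  # not found → worst rank
-- ===== SOURCE B (Python) =====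
-- def _option_rank(generated: str, correct_label: str) -> int:
--     """Return 1-based rank of correct_label among A/B/C/D found in generated text."""
--     order = []
--     for c in generated.upper():
--         if c in "ABCD" and c not in order:
--             order.append(c)
--     try:
--         return order.index(correct_label.upper()) + 1
--     except ValueError:
--         return len(order) + 1
-- ===== Notes on version B (the rewrite author's own statement) =====
-- stated objective: simpler
-- what changed: Replaced the four per-letter find calls plus tuple sort with a single left-to-right scan that appends each of A/B/C/D at its first occurrence, yielding the letters already in order of first appearance.
import Mathlib
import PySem

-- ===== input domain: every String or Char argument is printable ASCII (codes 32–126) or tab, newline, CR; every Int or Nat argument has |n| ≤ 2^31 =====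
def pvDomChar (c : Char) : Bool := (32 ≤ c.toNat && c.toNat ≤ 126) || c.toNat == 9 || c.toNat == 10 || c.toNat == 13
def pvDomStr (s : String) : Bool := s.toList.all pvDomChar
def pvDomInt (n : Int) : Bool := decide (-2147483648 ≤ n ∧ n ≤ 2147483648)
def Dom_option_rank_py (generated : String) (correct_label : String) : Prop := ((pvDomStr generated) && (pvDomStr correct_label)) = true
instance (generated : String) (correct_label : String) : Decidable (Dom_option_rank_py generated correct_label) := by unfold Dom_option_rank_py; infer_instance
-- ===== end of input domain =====

-- B replaces A's four per-letter find calls + tuple sort with a single scan collecting A/B/C/D in order of first appearance (simpler; same result).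


-- ===== PORT A =====
-- Python A: find each of "A","B","C","D" in text.upper(), keep (index, ch) pairs, sort, take labels, rank correct_label.upper().
def option_rank_py (generated : String) (correct_label : String) : Int :=
  let text := PySem.Chars.upper generated.toList
  let seen := (([['A'],['B'],['C'],['D']] : List (List Char)).foldl
    (fun seen ch =>
      let idx := PySem.Chars.find text ch
      if idx ≠ -1 then seen ++ [(idx, ch)] else seen) [])
  let seenS := PySem.List.sorted2 seen (fun p => p.1) (fun p => p.2)
  let labels := seenS.map (fun p => p.2)
  match PySem.List.index? labels (PySem.Chars.upper correct_label.toList) with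
  | some i => (i : Int) + 1
  | none => (labels.length : Int) + 1

-- ===== PORT B =====
-- Python B: one pass over text.upper(), appending each of A/B/C/D at its first occurrence; then rank correct_label.upper().
def option_rank_py_alt (generated : String) (correct_label : String) : Int :=
  let order := (PySem.Chars.upper generated.toList).foldl
    (fun acc c => if c ∈ (['A','B','C','D'] : List Char) ∧ [c] ∉ acc then acc ++ [[c]] else acc)
    ([] : List (List Char))
  match PySem.List.index? order (PySem.Chars.upper correct_label.toList) with
  | some i => (i : Int) + 1
  | none => (order.length : Int) + 1

-- ===== PRECONDITION & SPEC =====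
def Spec_option_rank_py (generated : String) (correct_label : String) (out : Int) : Prop := out = option_rank_py_alt generated correct_label
instance (generated : String) (correct_label : String) (out : Int) : Decidable (Spec_option_rank_py generated correct_label out) := by unfold Spec_option_rank_py; infer_instance

-- ===== CLAIM (what is proved, stated in full; the proofs are below) =====
def Claim_equal_option_rank_py : Prop := ∀ (generated : String) (correct_label : String), Dom_option_rank_py generated correct_label → Spec_option_rank_py generated correct_label (option_rank_py generated correct_label)

-- ===== LEMMAS AND PROOFS =====

theorem pv_infix_singleton (c : Char) (L : List Char) : [c] <:+: L ↔ c ∈ L := by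
  constructor
  · intro h; exact List.singleton_sublist.mp h.sublist
  · intro h
    obtain ⟨s, t, rfl⟩ := List.append_of_mem h
    exact ⟨s, t, by simp⟩

theorem pv_single_prefix (c : Char) (t : List Char) : [c] <+: t ↔ t.head? = some c := by
  constructor
  · rintro ⟨u, rfl⟩; rfl
  · intro h; cases t with
    | nil => simp at h
    | cons a u => simp at h; subst h; exact ⟨u, rfl⟩

-- find of a single character is its first index
theorem pv_find_singleton (L : List Char) (c : Char) (k : Nat)
    (hk : PySem.List.index? L c = some k) : PySem.Chars.find L [c] = (k : Int) := by
  obtain ⟨hklt, hget, hmin⟩ := PySem.List.getElem_of_index?_eq_some hk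
  have hmem : c ∈ L := hget ▸ List.getElem_mem hklt
  have hnn : 0 ≤ PySem.Chars.find L [c] :=
    (PySem.Chars.find_nonneg_iff L [c]).mpr ((pv_infix_singleton c L).mpr hmem)
  obtain ⟨hpre, hfmin⟩ := PySem.Chars.find_spec hnn
  rw [pv_single_prefix, List.head?_drop] at hpre
  set f := PySem.Chars.find L [c] with hf
  have hor : f.toNat = k := by
    rcases Nat.lt_trichotomy f.toNat k with h | h | h
    · exact absurd (by simpa using (List.getElem?_eq_some_iff.mp hpre).2) (hmin _ h)
    · exact h
    · exact absurd ((pv_single_prefix c _).mpr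
        (by rw [List.head?_drop]; exact List.getElem?_eq_some_iff.mpr ⟨hklt, hget⟩)) (hfmin k h)
  omega

-- find of a present char is stable under appending
theorem pv_find_stable (L t : List Char) (c : Char) (h : c ∈ L) :
    PySem.Chars.find (L ++ t) [c] = PySem.Chars.find L [c] := by
  obtain ⟨k, hk⟩ := Option.isSome_iff_exists.mp ((PySem.List.index?_isSome_iff L c).mpr h)
  rw [pv_find_singleton L c k hk,
      pv_find_singleton (L ++ t) c k (by rw [PySem.List.index?_append_of_mem t h]; exact hk)]

theorem pv_insertBy_congr {α : Type} (b1 b2 : α → α → Bool) (x : α) (ys : List α)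
    (h : ∀ y ∈ ys, b1 x y = b2 x y) :
    PySem.List.insertBy b1 x ys = PySem.List.insertBy b2 x ys := by
  induction ys with
  | nil => rfl
  | cons y ys ih =>
    simp only [PySem.List.insertBy]
    rw [h y (by simp)]
    by_cases hb : b2 x y = true
    · simp [hb]
    · simp only [Bool.not_eq_true] at hb
      simp [hb, ih (fun z hz => h z (by simp [hz]))]

theorem pv_foldl_insertBy_congr {α : Type} (S : List α) (b1 b2 : α → α → Bool)
    (hb : ∀ a ∈ S, ∀ b ∈ S, b1 a b = b2 a b) :
    ∀ (xs acc : List α), (∀ a ∈ xs, a ∈ S) → (∀ a ∈ acc, a ∈ S) →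
      xs.foldl (fun acc x => PySem.List.insertBy b1 x acc) acc
        = xs.foldl (fun acc x => PySem.List.insertBy b2 x acc) acc := by
  intro xs
  induction xs with
  | nil => intro acc _ _; rfl
  | cons x xs ih =>
    intro acc hxs hacc
    simp only [List.foldl_cons]
    rw [pv_insertBy_congr b1 b2 x acc (fun y hy => hb x (hxs x (by simp)) y (hacc y hy))]
    exact ih _ (fun a ha => hxs a (by simp [ha]))
      (fun a ha => by
        rcases (PySem.List.insertBy_mem_iff b2 x a acc).mp ha with rfl | ha
        · exact hxs a (by simp)
        · exact hacc a ha)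

-- the tuple sort collapses to a sort on the first key when the second key never decides
theorem pv_sorted2_eq_sorted {α κ₁ κ₂ : Type} [LT κ₁] [DecidableLT κ₁] [LT κ₂] [DecidableLT κ₂]
    (xs : List α) (k1 : α → κ₁) (k2 : α → κ₂)
    (h : ∀ a ∈ xs, ∀ b ∈ xs, ¬ k1 a < k1 b → ¬ k1 b < k1 a → ¬ k2 a < k2 b) :
    PySem.List.sorted2 xs k1 k2 = PySem.List.sorted xs k1 := by
  show xs.foldl (fun acc x => PySem.List.insertBy
      (fun a b => decide (k1 a < k1 b) || (!decide (k1 b < k1 a) && decide (k2 a < k2 b))) x acc) []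
    = xs.foldl (fun acc x => PySem.List.insertBy (fun a b => decide (k1 a < k1 b)) x acc) []
  apply pv_foldl_insertBy_congr xs _ _ ?_ xs [] (fun a ha => ha) (by simp)
  intro a ha b hb
  by_cases h1 : k1 a < k1 b
  · simp [h1]
  · by_cases h2 : k1 b < k1 a
    · simp [h1, h2]
    · simp [h1, h2, h a ha b hb h1 h2]

def pvOpts : List Char := ['A','B','C','D']

def pvStep (acc : List (List Char)) (c : Char) : List (List Char) :=
  if c ∈ pvOpts ∧ [c] ∉ acc then acc ++ [[c]] else acc

-- joint invariant of B's single scan: membership and ordering by first index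
theorem pv_order_inv (L : List Char) :
    (∀ x, x ∈ L.foldl pvStep [] ↔ ∃ d, x = [d] ∧ d ∈ pvOpts ∧ d ∈ L) ∧
    (L.foldl pvStep []).Pairwise (fun x y => PySem.Chars.find L x < PySem.Chars.find L y) := by
  induction L using List.reverseRecOn with
  | nil => simp
  | append_singleton L c ih =>
    obtain ⟨hmem, hpw⟩ := ih
    rw [List.foldl_append]
    simp only [List.foldl_cons, List.foldl_nil]
    set r := L.foldl pvStep [] with hr
    by_cases hc : c ∈ pvOpts ∧ [c] ∉ r
    · have hstep : pvStep r c = r ++ [[c]] := by simp [pvStep, hc]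
      have hcl : c ∉ L := fun hcl => hc.2 ((hmem [c]).mpr ⟨c, rfl, hc.1, hcl⟩)
      rw [hstep]
      constructor
      · intro x
        simp only [List.mem_append, List.mem_singleton, hmem x]
        constructor
        · rintro (⟨d, rfl, hd1, hd2⟩ | rfl)
          · exact ⟨d, rfl, hd1, by simp [hd2]⟩
          · exact ⟨c, rfl, hc.1, by simp⟩
        · rintro ⟨d, rfl, hd1, hd2⟩
          rcases hd2 with hd2 | hd2
          · exact Or.inl ⟨d, rfl, hd1, hd2⟩
          · subst hd2; exact Or.inr rfl
      · rw [List.pairwise_append]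
        refine ⟨?_, by simp, ?_⟩
        · refine hpw.imp_of_mem ?_
          intro x y hx hy hlt
          obtain ⟨d1, rfl, _, hd1⟩ := (hmem x).mp hx
          obtain ⟨d2, rfl, _, hd2⟩ := (hmem y).mp hy
          rwa [pv_find_stable L [c] d1 hd1, pv_find_stable L [c] d2 hd2]
        · intro x hx b hb
          simp only [List.mem_singleton] at hb; subst hb
          obtain ⟨d, rfl, _, hd⟩ := (hmem x).mp hx
          rw [pv_find_stable L [c] d hd]
          obtain ⟨k, hk⟩ := Option.isSome_iff_exists.mp ((PySem.List.index?_isSome_iff L d).mpr hd)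
          obtain ⟨hklt, _, _⟩ := PySem.List.getElem_of_index?_eq_some hk
          rw [pv_find_singleton L d k hk,
            pv_find_singleton (L ++ [c]) c L.length (PySem.List.index?_append_singleton_self L c hcl)]
          exact_mod_cast hklt
    · have hstep : pvStep r c = r := by simp [pvStep, hc]
      rw [hstep]
      constructor
      · intro x
        rw [hmem x]
        constructor
        · rintro ⟨d, rfl, hd1, hd2⟩; exact ⟨d, rfl, hd1, by simp [hd2]⟩
        · rintro ⟨d, rfl, hd1, hd2⟩
          rcases List.mem_append.mp hd2 with hd2 | hd2
          · exact ⟨d, rfl, hd1, hd2⟩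
          · simp at hd2
            rcases not_and_or.mp hc with h | h
            · exact absurd (hd2 ▸ hd1) h
            · rw [not_not] at h
              obtain ⟨d', hd', hd1', hd2'⟩ := (hmem [c]).mp h
              simp at hd'
              exact ⟨c, by rw [hd2], by rw [hd']; exact hd1', by rw [hd']; exact hd2'⟩
      · refine hpw.imp_of_mem ?_
        intro x y hx hy hlt
        obtain ⟨d1, rfl, _, hd1⟩ := (hmem x).mp hx
        obtain ⟨d2, rfl, _, hd2⟩ := (hmem y).mp hy
        rwa [pv_find_stable L [c] d1 hd1, pv_find_stable L [c] d2 hd2]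

theorem pv_cands_mem (x : List Char) :
    x ∈ ([['A'],['B'],['C'],['D']] : List (List Char)) ↔ ∃ d, x = [d] ∧ d ∈ pvOpts := by
  constructor
  · intro h
    fin_cases h
    · exact ⟨'A', rfl, by decide⟩
    · exact ⟨'B', rfl, by decide⟩
    · exact ⟨'C', rfl, by decide⟩
    · exact ⟨'D', rfl, by decide⟩
  · rintro ⟨d, rfl, hd⟩
    fin_cases hd <;> simp

-- A's sorted label list equals B's first-appearance list
theorem pv_labels_eq (L : List Char) :
    (PySem.List.sorted2
      (List.map (fun ch => (PySem.Chars.find L ch, ch))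
        ((([['A'],['B'],['C'],['D']] : List (List Char))).filter
          (fun ch => decide (PySem.Chars.find L ch ≠ -1))))
      (fun p => p.1) (fun p => p.2)).map (fun p => p.2)
    = L.foldl pvStep [] := by
  obtain ⟨hmem, hpw⟩ := pv_order_inv L
  set f : List Char → Int × List Char := fun ch => (PySem.Chars.find L ch, ch) with hf
  set filt := (([['A'],['B'],['C'],['D']] : List (List Char))).filter
      (fun ch => decide (PySem.Chars.find L ch ≠ -1)) with hfilt
  set ord := L.foldl pvStep [] with hord
  have hfiltmem : ∀ x, x ∈ filt ↔ ∃ d, x = [d] ∧ d ∈ pvOpts ∧ d ∈ L := by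
    intro x
    rw [hfilt, List.mem_filter]
    constructor
    · rintro ⟨hx, hfind⟩
      obtain ⟨d, rfl, hd⟩ := (pv_cands_mem x).mp hx
      simp only [decide_eq_true_eq] at hfind
      exact ⟨d, rfl, hd, (pv_infix_singleton d L).mp
        ((PySem.Chars.find_ne_neg_one_iff L [d]).mp hfind)⟩
    · rintro ⟨d, rfl, hd, hdL⟩
      refine ⟨(pv_cands_mem [d]).mpr ⟨d, rfl, hd⟩, ?_⟩
      simp only [decide_eq_true_eq]
      exact (PySem.Chars.find_ne_neg_one_iff L [d]).mpr ((pv_infix_singleton d L).mpr hdL)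
  have hordnd : ord.Nodup := hpw.imp fun hlt heq => absurd (heq ▸ hlt) (lt_irrefl _)
  have hfiltnd : filt.Nodup := List.Nodup.filter _ (by decide)
  have hperm : ord.Perm filt := (List.perm_ext_iff_of_nodup hordnd hfiltnd).mpr
    (fun x => (hmem x).trans (hfiltmem x).symm)
  have hinj : ∀ a ∈ List.map f filt, ∀ b ∈ List.map f filt,
      ¬ a.1 < b.1 → ¬ b.1 < a.1 → ¬ a.2 < b.2 := by
    rintro a ha b hb hn1 hn2
    have h1 : a.1 = b.1 := le_antisymm (not_lt.mp hn2) (not_lt.mp hn1)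
    suffices hab : a = b by rw [hab]; exact lt_irrefl _
    obtain ⟨ch1, hch1, rfl⟩ := List.mem_map.mp ha
    obtain ⟨ch2, hch2, rfl⟩ := List.mem_map.mp hb
    obtain ⟨d1, rfl, _, hd1⟩ := (hfiltmem ch1).mp hch1
    obtain ⟨d2, rfl, _, hd2⟩ := (hfiltmem ch2).mp hch2
    obtain ⟨k1, hk1⟩ := Option.isSome_iff_exists.mp ((PySem.List.index?_isSome_iff L d1).mpr hd1)
    obtain ⟨k2, hk2⟩ := Option.isSome_iff_exists.mp ((PySem.List.index?_isSome_iff L d2).mpr hd2)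
    obtain ⟨hl1, hg1, -⟩ := PySem.List.getElem_of_index?_eq_some hk1
    obtain ⟨hl2, hg2, -⟩ := PySem.List.getElem_of_index?_eq_some hk2
    simp only [hf, pv_find_singleton L d1 k1 hk1, pv_find_singleton L d2 k2 hk2] at h1 ⊢
    have : k1 = k2 := by exact_mod_cast h1
    subst this
    rw [hg1.symm.trans hg2]
  have hpair : (ord.map f).Pairwise (fun a b => a.1 < b.1) :=
    List.pairwise_map.mpr hpw
  rw [pv_sorted2_eq_sorted (List.map f filt) (fun p => p.1) (fun p => p.2) hinj,
    PySem.List.sorted_eq_of_perm_of_pairwise_lt (List.map f filt) (List.map f ord)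
      (fun p => p.1) (hperm.map f) hpair]
  have hid : ((fun (p : Int × List Char) => p.2) ∘ fun ch => (PySem.Chars.find L ch, ch)) = id := rfl
  rw [hf, List.map_map, hid, List.map_id]

theorem pv_main (g cl : String) : option_rank_py g cl = option_rank_py_alt g cl := by
  simp only [option_rank_py, option_rank_py_alt]
  have hB : (fun (acc : List (List Char)) c =>
      if c ∈ (['A','B','C','D'] : List Char) ∧ [c] ∉ acc then acc ++ [[c]] else acc) = pvStep := by
    funext acc c; simp [pvStep, pvOpts]
  rw [hB]
  rw [PySem.List.foldl_append_ite (fun ch => PySem.Chars.find (PySem.Chars.upper g.toList) ch ≠ -1)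
       (fun ch => (PySem.Chars.find (PySem.Chars.upper g.toList) ch, ch))
       ([['A'],['B'],['C'],['D']] : List (List Char)) []]
  rw [List.nil_append, pv_labels_eq]

-- ===== VERDICT (by name: the statement is the Claim_ definition above) =====
theorem option_rank_py_spec : Claim_equal_option_rank_py := by
  intro g cl _
  unfold Spec_option_rank_py
  exact pv_main g cl
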